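-- pv_equiv track=rewrite | github.com/lesc-ufv/axis_acc_template_generator | src/components.py | calc_and_tree_size_helper
-- ===== SOURCE A (Python) =====
-- def calc_and_tree_size_helper(num_input, radix):
--     stack1 = []
--     stack2 = []
--     r = 0
--     for i in range(num_input):
--         stack1.append(1)
--
--     flag = 1
--     while len(stack1) > 1 or len(stack2) > 1:
--         if flag:
--             for i in range(radix):
--                 if len(stack1) > 0:
--                     stack1.pop(0)
--             stack2.append(1)
--             r += 1
--             if len(stack1) <= 1:
--                 flag = 0
--                 if len(stack1) > 0:
--                     stack2.append(1)
--                     r += 1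
--                     stack1.pop(0)
--         else:
--             for i in range(radix):
--                 if len(stack2) > 0:
--                     stack2.pop(0)
--             stack1.append(1)
--             r += 1
--             if len(stack2) <= 1:
--                 flag = 1
--                 if len(stack2) > 0:
--                     stack1.append(1)
--                     r += 1
--                     stack2.pop(0)
--     return r
-- ===== SOURCE B (Python) =====
-- def calc_and_tree_size_helper(num_input, radix):
--     total = 0
--     m = num_input
--     while m > 1:
--         groups = (m - 2) // radix + 1
--         carry = 1 if (m - 1) % radix == 0 else 0
--         total += groups + carry
--         m = groups + carry
--     return total
-- ===== Notes on version B (the rewrite author's own statement) =====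
-- stated objective: faster
-- what changed: Replaces the two-stack element-by-element simulation (with O(n) list.pop(0) shifts) by a per-level arithmetic recurrence: each reduction level contributes groups = (m-2)//radix + 1 combine ops plus a carry op when (m-1) is divisible by radix, so only the level sizes are iterated.
import Mathlib
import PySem

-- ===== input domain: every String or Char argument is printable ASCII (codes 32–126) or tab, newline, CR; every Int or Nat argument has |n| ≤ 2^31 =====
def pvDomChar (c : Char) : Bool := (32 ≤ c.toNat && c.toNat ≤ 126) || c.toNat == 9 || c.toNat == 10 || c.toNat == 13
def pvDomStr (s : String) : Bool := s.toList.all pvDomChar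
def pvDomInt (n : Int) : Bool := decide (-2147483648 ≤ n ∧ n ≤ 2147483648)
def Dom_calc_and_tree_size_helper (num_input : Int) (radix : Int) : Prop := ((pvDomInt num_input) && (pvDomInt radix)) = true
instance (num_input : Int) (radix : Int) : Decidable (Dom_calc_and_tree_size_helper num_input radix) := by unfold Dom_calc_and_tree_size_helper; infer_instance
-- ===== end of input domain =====

-- B replaces A's two-stack element-by-element simulation by a per-level arithmetic
-- recurrence over level sizes (objective: faster; measured).

-- ===== PORT A =====
-- 'for i in range(radix): if len(stack1) > 0: stack1.pop(0)' — pop(0) on a list known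
-- nonempty is exactly List.tail, so this round is a fold over the range dropping heads.
def pvPopLoop (radix : Int) (s : List Int) : List Int :=
  (PySem.List.pyRange 0 radix 1).foldl (fun s _ => if s.length > 0 then s.tail else s) s

-- the while loop of A; fuel is a port artifact only (inside Pre_ the loop terminates in
-- fewer than the supplied 3*num_input.toNat + 10 iterations; outside Pre_ A diverges and
-- nothing is claimed).  'if flag:' on the Python int flag is 'flag ≠ 0'.
def pvAMain : Nat → Int → List Int → List Int → Int → Int → Int
  | 0, _, _, _, r, _ => r
  | fuel+1, radix, stack1, stack2, r, flag =>
    if stack1.length > 1 ∨ stack2.length > 1 then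
      if flag ≠ 0 then
        if (pvPopLoop radix stack1).length ≤ 1 then
          if (pvPopLoop radix stack1).length > 0 then
            pvAMain fuel radix (pvPopLoop radix stack1).tail (stack2 ++ [1] ++ [1]) (r + 1 + 1) 0
          else pvAMain fuel radix (pvPopLoop radix stack1) (stack2 ++ [1]) (r + 1) 0
        else pvAMain fuel radix (pvPopLoop radix stack1) (stack2 ++ [1]) (r + 1) flag
      else
        if (pvPopLoop radix stack2).length ≤ 1 then
          if (pvPopLoop radix stack2).length > 0 then
            pvAMain fuel radix (stack1 ++ [1] ++ [1]) (pvPopLoop radix stack2).tail (r + 1 + 1) 1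
          else pvAMain fuel radix (stack1 ++ [1]) (pvPopLoop radix stack2) (r + 1) 1
        else pvAMain fuel radix (stack1 ++ [1]) (pvPopLoop radix stack2) (r + 1) flag
    else r

def calc_and_tree_size_helper (num_input : Int) (radix : Int) : Int :=
  pvAMain (3 * num_input.toNat + 10) radix
    ((PySem.List.pyRange 0 num_input 1).foldl (fun s _ => s ++ [1]) []) [] 0 1

-- ===== PORT B =====
-- the while loop of Source B; fuel is a port artifact only (for radix ≥ 2 the level size m
-- strictly decreases, so num_input.toNat + 1 iterations always suffice; for radix ≤ 1
-- and num_input ≥ 2 the Python loop diverges or divides by zero — outside Pre_).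
def pvBLoop : Nat → Int → Int → Int → Int
  | 0, _, _, total => total
  | fuel+1, m, radix, total =>
    if m > 1 then
      pvBLoop fuel
        (PySem.Int.floordiv (m - 2) radix + 1
          + (if PySem.Int.mod (m - 1) radix = 0 then 1 else 0))
        radix
        (total + (PySem.Int.floordiv (m - 2) radix + 1
          + (if PySem.Int.mod (m - 1) radix = 0 then 1 else 0)))
    else total

def calc_and_tree_size_helper_alt (num_input : Int) (radix : Int) : Int :=
  pvBLoop (num_input.toNat + 1) num_input radix 0

-- ===== PRECONDITION & SPEC =====
-- A's while loop never terminates when num_input ≥ 2 and radix ≤ 1 (each round removes at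
-- most one element in total while appending one); Pre_ excludes exactly those diverging
-- inputs, on which A returns nothing.
def Pre_calc_and_tree_size_helper (num_input : Int) (radix : Int) : Prop :=
  num_input ≤ 1 ∨ 2 ≤ radix
instance (num_input : Int) (radix : Int) : Decidable (Pre_calc_and_tree_size_helper num_input radix) := by
  unfold Pre_calc_and_tree_size_helper; infer_instance

def pvWitness_calc_and_tree_size_helper : Int × Int := (10, 3)

def Spec_calc_and_tree_size_helper (num_input : Int) (radix : Int) (out : Int) : Prop := out = calc_and_tree_size_helper_alt num_input radix
instance (num_input : Int) (radix : Int) (out : Int) : Decidable (Spec_calc_and_tree_size_helper num_input radix out) := by unfold Spec_calc_and_tree_size_helper; infer_instance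

-- ===== CLAIM (what is proved, stated in full; the proofs are below) =====
def Claim_equal_calc_and_tree_size_helper : Prop := ∀ (num_input : Int) (radix : Int), Dom_calc_and_tree_size_helper num_input radix → Pre_calc_and_tree_size_helper num_input radix → Spec_calc_and_tree_size_helper num_input radix (calc_and_tree_size_helper num_input radix)

-- ===== LEMMAS AND PROOFS =====

-- measure for A's loop on stack lengths (act = active stack, oth = the other one)
def pvPhi (act oth : Nat) : Nat :=
  3 * (act + oth) + (if act ≤ 1 ∧ 2 ≤ oth then 5 else 0)

-- A's loop abstracted to stack lengths, (active, other) view; total by the measure pvPhi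
-- (the k < 2 guard is never taken in the lemmas below).
def pvHA (k act oth : Nat) (r : Int) : Int :=
  if hk : k < 2 then r
  else if h : 1 < act ∨ 1 < oth then
    if h1 : act - k ≤ 1 then
      if h2 : 0 < act - k then pvHA k (oth + 2) 0 (r + 2)
      else pvHA k (oth + 1) 0 (r + 1)
    else pvHA k (act - k) (oth + 1) (r + 1)
  else r
termination_by pvPhi act oth
decreasing_by
  · simp only [pvPhi]; split_ifs <;> omega
  · simp only [pvPhi]; split_ifs <;> omega
  · simp only [pvPhi]; split_ifs <;> omega

-- the per-level count strictly shrinks (cited by pvHB's termination proof and for fuel accounting)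
lemma pvHB_dec (k m : Nat) (hk : 2 ≤ k) (hm : 2 ≤ m) :
    (((m - 2) / k + 1) + (if (m - 1) % k = 0 then 1 else 0)) < m := by
  have := Nat.div_le_self (m - 2) k
  split_ifs with hc
  · obtain ⟨q, hq⟩ := Nat.dvd_of_mod_eq_zero hc
    match q, hq with
    | 0, hq => omega
    | q'+1, hq =>
      have hexp : k * (q' + 1) = k * q' + k := Nat.mul_succ k q'
      have h2 : m - 2 = k * q' + (k - 1) := by omega
      have h3 : (m - 2) / k = q' := by
        rw [h2, Nat.mul_add_div (by omega)]
        simp [Nat.div_eq_of_lt (show k - 1 < k by omega)]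
      have h4 : 2 * (q' + 1) ≤ k * (q' + 1) := Nat.mul_le_mul_right _ (by omega)
      omega
  · have h5 : (m - 2) / k ≤ (m - 2) / 2 := Nat.div_le_div_left (by omega) (by omega)
    have h6 : (m - 2) / 2 ≤ m - 2 := Nat.div_le_self _ _
    omega

-- B's recurrence on Nat level sizes
def pvHB (k m : Nat) : Int :=
  if _hk : k < 2 then 0
  else if hm : 2 ≤ m then
    ((((m - 2) / k + 1) + (if (m - 1) % k = 0 then 1 else 0) : Nat) : Int)
      + pvHB k (((m - 2) / k + 1) + (if (m - 1) % k = 0 then 1 else 0))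
  else 0
termination_by m
decreasing_by
  exact pvHB_dec k m (by omega) hm

-- non-dependent unfolding of pvHA (explicit arguments let rewrites target one side)
lemma pvHA_unfold (k act oth : Nat) (r : Int) :
    pvHA k act oth r
      = if k < 2 then r
        else if 1 < act ∨ 1 < oth then
          if act - k ≤ 1 then
            if 0 < act - k then pvHA k (oth + 2) 0 (r + 2)
            else pvHA k (oth + 1) 0 (r + 1)
          else pvHA k (act - k) (oth + 1) (r + 1)
        else r := by
  rw [pvHA]
  split_ifs <;> rfl

-- non-dependent unfolding of pvHB with explicit arguments
lemma pvHB_unfold (k m : Nat) :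
    pvHB k m
      = if k < 2 then 0
        else if 2 ≤ m then
          ((((m - 2) / k + 1) + (if (m - 1) % k = 0 then 1 else 0) : Nat) : Int)
            + pvHB k (((m - 2) / k + 1) + (if (m - 1) % k = 0 then 1 else 0))
        else 0 := by
  rw [pvHB]
  split_ifs <;> rfl

-- congruence helper for pvHA applications
lemma pvHA_congr {k a b a' b' : Nat} {r r' : Int} (ha : a = a') (hb : b = b')
    (hrr : r = r') : pvHA k a b r = pvHA k a' b' r' := by
  rw [ha, hb, hrr]

-- length facts for the list-level port
lemma pvFoldTail_length (l : List Int) (s : List Int) :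
    (l.foldl (fun s _ => if s.length > 0 then s.tail else s) s).length
      = s.length - l.length := by
  induction l generalizing s with
  | nil => simp
  | cons x xs ih =>
    simp only [List.foldl_cons, ih, List.length_cons]
    split_ifs with h
    · rw [List.length_tail]; omega
    · omega

lemma pvPopLoop_length (radix : Int) (s : List Int) :
    (pvPopLoop radix s).length = s.length - radix.toNat := by
  simp [pvPopLoop, pvFoldTail_length, PySem.List.length_pyRange_one]

lemma pvFoldAppend_length (l : List Int) (s : List Int) :
    (l.foldl (fun s _ => s ++ [1]) s).length = s.length + l.length := by
  induction l generalizing s with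
  | nil => simp
  | cons x xs ih => simp

-- one phase of pvHA: a full reduction level collapses into its arithmetic count
lemma pvHA_phase (k : Nat) (hk : 2 ≤ k) :
    ∀ act, 2 ≤ act → ∀ (oth : Nat) (r : Int),
    pvHA k act oth r
      = pvHA k (oth + (((act - 2) / k + 1) + (if (act - 1) % k = 0 then 1 else 0))) 0
          (r + ((((act - 2) / k + 1) + (if (act - 1) % k = 0 then 1 else 0) : Nat) : Int)) := by
  intro act
  induction act using Nat.strong_induction_on with
  | _ act ih =>
    intro hact oth r
    rw [pvHA, dif_neg (by omega), dif_pos (by omega)]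
    by_cases h1 : act - k ≤ 1
    · rw [dif_pos h1]
      by_cases h2 : 0 < act - k
      · -- act = k + 1 : one group plus the leftover carry
        rw [dif_pos h2]
        have hk1 : act = k + 1 := by omega
        have ht : (act - 2) / k = 0 := Nat.div_eq_of_lt (by omega)
        have hc : (act - 1) % k = 0 := by
          rw [show act - 1 = k by omega, Nat.mod_self]
        rw [ht, hc]
        norm_num
      · -- 2 ≤ act ≤ k : a single group, no leftover
        rw [dif_neg h2]
        have ht : (act - 2) / k = 0 := Nat.div_eq_of_lt (by omega)
        have hc : ¬ (act - 1) % k = 0 := by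
          rw [Nat.mod_eq_of_lt (by omega)]; omega
        rw [ht, if_neg hc]
        norm_num
    · -- act ≥ k + 2 : one more group, recurse on act - k
      rw [dif_neg h1]
      have hrec := ih (act - k) (by omega) (by omega) (oth + 1) (r + 1)
      rw [hrec]
      have ht : (act - k - 2) / k + 1 = (act - 2) / k := by
        have : act - 2 = (act - k - 2) + k := by omega
        rw [this, Nat.add_div_right _ (by omega)]
      have hc : (act - k - 1) % k = (act - 1) % k := by
        have : act - 1 = (act - k - 1) + k := by omega
        rw [this, Nat.add_mod_right]
      rw [← ht, ← hc]
      have : ∀ (x : Nat) (y : Int), r + 1 + (x : Int) = r + y → True := fun _ _ _ => trivial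
      congr 1
      · omega
      · push_cast; ring

-- pvHA from a fresh phase equals B's recurrence
lemma pvHA_eq_pvHB (k : Nat) (hk : 2 ≤ k) :
    ∀ act (r : Int), pvHA k act 0 r = r + pvHB k act := by
  intro act
  induction act using Nat.strong_induction_on with
  | _ act ih =>
    intro r
    by_cases hact : 2 ≤ act
    · rw [pvHA_phase k hk act hact 0 r]
      have hlt := pvHB_dec k act hk hact
      rw [Nat.zero_add, ih _ hlt]
      have hnk : ¬ k < 2 := by omega
      rw [pvHB_unfold k act, if_neg hnk, if_pos hact]
      ring
    · have hnk : ¬ k < 2 := by omega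
      have hna : ¬ (1 < act ∨ 1 < 0) := by omega
      have hna2 : ¬ 2 ≤ act := by omega
      rw [pvHA_unfold, if_neg hnk, if_neg hna,
          pvHB_unfold k act, if_neg hnk, if_neg hna2]
      ring

-- the list-level loop agrees with pvHA on stack lengths, given enough fuel
lemma pvAMain_corr :
    ∀ (fuel : Nat) (radix : Int) (s1 s2 : List Int) (r flag : Int), 2 ≤ radix →
    pvPhi (if flag ≠ 0 then s1.length else s2.length)
          (if flag ≠ 0 then s2.length else s1.length) + 1 ≤ fuel →
    pvAMain fuel radix s1 s2 r flag
      = pvHA radix.toNat (if flag ≠ 0 then s1.length else s2.length)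
          (if flag ≠ 0 then s2.length else s1.length) r := by
  intro fuel
  induction fuel with
  | zero => intro radix s1 s2 r flag hr hfuel; simp [pvPhi] at hfuel
  | succ f ih =>
    intro radix s1 s2 r flag hr hfuel
    have hk : 2 ≤ radix.toNat := by omega
    by_cases hf : flag ≠ 0
    · rw [if_pos hf] at hfuel ⊢
      rw [if_pos hf] at hfuel ⊢
      rw [pvAMain]
      by_cases hcond : s1.length > 1 ∨ s2.length > 1
      · rw [if_pos hcond, if_pos hf]
        have hpop := pvPopLoop_length radix s1
        by_cases h1 : (pvPopLoop radix s1).length ≤ 1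
        · rw [if_pos h1]
          rw [hpop] at h1
          by_cases h2 : (pvPopLoop radix s1).length > 0
          · rw [if_pos h2]
            rw [hpop] at h2
            rw [ih radix _ _ (r + 1 + 1) 0 hr (by
              simp only [ne_eq, not_true_eq_false, ite_false, List.length_append, List.length_tail,
                List.length_cons, List.length_nil, hpop, pvPhi]
              simp only [pvPhi] at hfuel
              split_ifs at hfuel ⊢ <;> omega)]
            simp only [ne_eq, not_true_eq_false, ite_false, List.length_append, List.length_tail,
              List.length_cons, List.length_nil, hpop]
            rw [pvHA_unfold radix.toNat s1.length s2.length r,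
                if_neg (by omega), if_pos (by omega), if_pos (by omega),
                if_pos (by omega)]
            exact pvHA_congr (by omega) (by omega) (by omega)
          · rw [if_neg h2]
            rw [hpop] at h2
            rw [ih radix _ _ (r + 1) 0 hr (by
              simp only [ne_eq, not_true_eq_false, ite_false, List.length_append, List.length_cons,
                List.length_nil, hpop, pvPhi]
              simp only [pvPhi] at hfuel
              split_ifs at hfuel ⊢ <;> omega)]
            simp only [ne_eq, not_true_eq_false, ite_false, List.length_append, List.length_cons,
              List.length_nil, hpop]
            rw [pvHA_unfold radix.toNat s1.length s2.length r,
                if_neg (by omega), if_pos (by omega), if_pos (by omega),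
                if_neg (by omega)]
            exact pvHA_congr (by omega) (by omega) (by omega)
        · rw [if_neg h1]
          rw [hpop] at h1
          rw [ih radix _ _ (r + 1) flag hr (by
            rw [if_pos hf, if_pos hf]
            simp only [List.length_append, List.length_cons, List.length_nil,
              hpop, pvPhi]
            simp only [pvPhi] at hfuel
            split_ifs at hfuel ⊢ <;> omega)]
          rw [if_pos hf, if_pos hf]
          rw [pvHA_unfold radix.toNat s1.length s2.length r,
              if_neg (by omega), if_pos (by omega), if_neg (by omega)]
          simp only [List.length_append, List.length_cons, List.length_nil, hpop]
      · rw [if_neg hcond]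
        rw [pvHA_unfold radix.toNat s1.length s2.length r,
            if_neg (by omega), if_neg (by omega)]
    · rw [if_neg hf] at hfuel ⊢
      rw [if_neg hf] at hfuel ⊢
      rw [pvAMain]
      by_cases hcond : s1.length > 1 ∨ s2.length > 1
      · rw [if_pos hcond, if_neg hf]
        have hpop := pvPopLoop_length radix s2
        by_cases h1 : (pvPopLoop radix s2).length ≤ 1
        · rw [if_pos h1]
          rw [hpop] at h1
          by_cases h2 : (pvPopLoop radix s2).length > 0
          · rw [if_pos h2]
            rw [hpop] at h2
            rw [ih radix _ _ (r + 1 + 1) 1 hr (by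
              simp only [ne_eq, one_ne_zero, not_false_iff, ite_true, List.length_append, List.length_tail,
                List.length_cons, List.length_nil, hpop, pvPhi]
              simp only [pvPhi] at hfuel
              split_ifs at hfuel ⊢ <;> omega)]
            simp only [ne_eq, one_ne_zero, not_false_iff, ite_true, List.length_append, List.length_tail,
              List.length_cons, List.length_nil, hpop]
            rw [pvHA_unfold radix.toNat s2.length s1.length r,
                if_neg (by omega), if_pos (by omega), if_pos (by omega),
                if_pos (by omega)]
            exact pvHA_congr (by omega) (by omega) (by omega)
          · rw [if_neg h2]
            rw [hpop] at h2
            rw [ih radix _ _ (r + 1) 1 hr (by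
              simp only [ne_eq, one_ne_zero, not_false_iff, ite_true, List.length_append, List.length_cons,
                List.length_nil, hpop, pvPhi]
              simp only [pvPhi] at hfuel
              split_ifs at hfuel ⊢ <;> omega)]
            simp only [ne_eq, one_ne_zero, not_false_iff, ite_true, List.length_append, List.length_cons,
              List.length_nil, hpop]
            rw [pvHA_unfold radix.toNat s2.length s1.length r,
                if_neg (by omega), if_pos (by omega), if_pos (by omega),
                if_neg (by omega)]
            exact pvHA_congr (by omega) (by omega) (by omega)
        · rw [if_neg h1]
          rw [hpop] at h1
          rw [ih radix _ _ (r + 1) flag hr (by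
            rw [if_neg hf, if_neg hf]
            simp only [List.length_append, List.length_cons, List.length_nil,
              hpop, pvPhi]
            simp only [pvPhi] at hfuel
            split_ifs at hfuel ⊢ <;> omega)]
          rw [if_neg hf, if_neg hf]
          rw [pvHA_unfold radix.toNat s2.length s1.length r,
              if_neg (by omega), if_pos (by omega), if_neg (by omega)]
          simp only [List.length_append, List.length_cons, List.length_nil, hpop]
      · rw [if_neg hcond]
        rw [pvHA_unfold radix.toNat s2.length s1.length r,
            if_neg (by omega), if_neg (by omega)]

-- B's fueled loop agrees with pvHB, given enough fuel
lemma pvBLoop_corr :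
    ∀ (fuel : Nat) (m radix total : Int), 2 ≤ radix → m.toNat < fuel →
    pvBLoop fuel m radix total = total + pvHB radix.toNat m.toNat := by
  intro fuel
  induction fuel with
  | zero => intro m radix total hr hfuel; omega
  | succ f ih =>
    intro m radix total hr hfuel
    have hk : 2 ≤ radix.toNat := by omega
    have hnk : ¬ radix.toNat < 2 := by omega
    rw [pvBLoop]
    by_cases hm : m > 1
    · rw [if_pos hm]
      have hm2 : 2 ≤ m.toNat := by omega
      have e3 : radix = ((radix.toNat : Nat) : Int) := by omega
      have hg : PySem.Int.floordiv (m - 2) radix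
          = (((m.toNat - 2) / radix.toNat : Nat) : Int) := by
        rw [show (m - 2 : Int) = ((m.toNat - 2 : Nat) : Int) by omega, e3,
            PySem.Int.floordiv_natCast]
        simp
      have hc : PySem.Int.mod (m - 1) radix
          = (((m.toNat - 1) % radix.toNat : Nat) : Int) := by
        rw [show (m - 1 : Int) = ((m.toNat - 1 : Nat) : Int) by omega, e3,
            PySem.Int.mod_natCast]
        simp
      have hsum : PySem.Int.floordiv (m - 2) radix + 1
            + (if PySem.Int.mod (m - 1) radix = 0 then (1 : Int) else 0)
          = ((((m.toNat - 2) / radix.toNat + 1)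
              + (if (m.toNat - 1) % radix.toNat = 0 then 1 else 0) : Nat) : Int) := by
        rw [hg, hc]
        split_ifs with h1 h2 h3 <;> push_cast <;> omega
      rw [hsum]
      have hdec := pvHB_dec radix.toNat m.toNat hk hm2
      rw [ih _ radix _ hr (by
        rw [Int.toNat_natCast]
        omega)]
      rw [Int.toNat_natCast]
      rw [pvHB_unfold radix.toNat m.toNat, if_neg hnk, if_pos hm2]
      ring
    · rw [if_neg hm]
      rw [pvHB_unfold radix.toNat m.toNat, if_neg hnk, if_neg (by omega)]
      ring

-- ===== VERDICT (by name: the statement is the Claim_ definition above) =====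
theorem calc_and_tree_size_helper_spec : Claim_equal_calc_and_tree_size_helper := by
  intro num_input radix hdom hpre
  unfold Spec_calc_and_tree_size_helper
  unfold calc_and_tree_size_helper calc_and_tree_size_helper_alt
  have hlen : ((PySem.List.pyRange 0 num_input 1).foldl
      (fun s _ => s ++ [1]) ([] : List Int)).length = num_input.toNat := by
    rw [pvFoldAppend_length]
    simp [PySem.List.length_pyRange_one]
  generalize hS : ((PySem.List.pyRange 0 num_input 1).foldl
      (fun s _ => s ++ [1]) ([] : List Int)) = S at hlen ⊢
  by_cases hn : num_input ≤ 1
  · rw [show 3 * num_input.toNat + 10 = (3 * num_input.toNat + 9) + 1 from rfl,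
        pvAMain, if_neg (by simp only [List.length_nil]; omega)]
    rw [show num_input.toNat + 1 = num_input.toNat + 0 + 1 from rfl,
        pvBLoop, if_neg (by omega)]
  · have hr2 : 2 ≤ radix := by
      cases hpre with
      | inl h => omega
      | inr h => exact h
    rw [pvAMain_corr _ radix S [] 0 1 hr2 (by
      simp only [ne_eq, one_ne_zero, not_false_iff, ite_true, List.length_nil,
        hlen, pvPhi]
      split_ifs <;> omega)]
    simp only [ne_eq, one_ne_zero, not_false_iff, ite_true, List.length_nil, hlen]
    rw [pvHA_eq_pvHB radix.toNat (by omega) num_input.toNat 0]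
    rw [pvBLoop_corr (num_input.toNat + 1) num_input radix 0 hr2 (by omega)]
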